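-- pv_equiv track=rewrite | github.com/Top-Figures-Business-Solution-Pty-Ltd/Smart-Accounting-SaaS-Platform | smart_accounting/ip_protection/utils/partner_protection.py | sanitize_partner_communications
-- ===== SOURCE A (Python) =====
-- def sanitize_partner_communications(message):
--     """
--     Remove proprietary references from partner communications
--     """
--     proprietary_terms = [
--         "pricing_multiplier",
--         "profitability_score",
--         "competition_analysis",
--         "internal_cost_structure"
--     ]
--
--     sanitized = message
--     for term in proprietary_terms:
--         sanitized = sanitized.replace(term, "[CONFIDENTIAL]")
--
--     return sanitized
-- ===== SOURCE B (Python) =====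
-- def sanitize_partner_communications(message):
--     """
--     Remove proprietary references from partner communications
--     """
--     proprietary_terms = (
--         "pricing_multiplier",
--         "profitability_score",
--         "competition_analysis",
--         "internal_cost_structure",
--     )
--
--     pieces = []
--     i = 0
--     n = len(message)
--     while i < n:
--         for term in proprietary_terms:
--             if message.startswith(term, i):
--                 pieces.append("[CONFIDENTIAL]")
--                 i += len(term)
--                 break
--         else:
--             pieces.append(message[i])
--             i += 1
--     return "".join(pieces)
-- ===== Notes on version B (the rewrite author's own statement) =====
-- stated objective: alternative
-- what changed: Replaces the four sequential str.replace passes by a single left-to-right scan that, at each position, matches whichever proprietary term starts there and emits [CONFIDENTIAL] once, building the output in one pass.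
import Mathlib
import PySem

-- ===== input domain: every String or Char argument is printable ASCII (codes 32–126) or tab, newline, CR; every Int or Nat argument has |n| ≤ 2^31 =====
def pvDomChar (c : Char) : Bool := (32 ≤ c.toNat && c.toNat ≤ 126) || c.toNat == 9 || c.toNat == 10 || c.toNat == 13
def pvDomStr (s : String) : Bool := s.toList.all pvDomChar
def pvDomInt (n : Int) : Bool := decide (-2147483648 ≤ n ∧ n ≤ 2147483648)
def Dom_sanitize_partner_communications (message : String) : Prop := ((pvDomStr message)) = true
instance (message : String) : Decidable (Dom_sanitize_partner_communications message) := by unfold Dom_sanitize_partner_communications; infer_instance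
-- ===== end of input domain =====

-- B replaces A's four sequential str.replace passes by one left-to-right scan that matches any term at each position (alternative decomposition, same result).


-- ===== PORT A =====
def sanitize_partner_communications (message : String) : String :=
  let proprietary_terms : List String :=
    ["pricing_multiplier", "profitability_score", "competition_analysis", "internal_cost_structure"]
  proprietary_terms.foldl (fun sanitized term => PySem.Str.replace sanitized term "[CONFIDENTIAL]") message

-- ===== PORT B =====
-- the four terms and the replacement, as char lists
def pvT1 : List Char := "pricing_multiplier".toList
def pvT2 : List Char := "profitability_score".toList
def pvT3 : List Char := "competition_analysis".toList
def pvT4 : List Char := "internal_cost_structure".toList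
def pvRep : List Char := "[CONFIDENTIAL]".toList

-- needed by pvScan's termination proof
theorem pvT1_len : pvT1.length = 18 := by decide
theorem pvT2_len : pvT2.length = 19 := by decide
theorem pvT3_len : pvT3.length = 20 := by decide
theorem pvT4_len : pvT4.length = 23 := by decide

-- B's single scan: at each position try the terms in order (message.startswith(term, i));
-- on a match emit "[CONFIDENTIAL]" and jump past the term, else keep the char
def pvScan : List Char → List Char
  | [] => []
  | c :: t =>
      if pvT1.isPrefixOf (c :: t) then pvRep ++ pvScan ((c :: t).drop pvT1.length)
      else if pvT2.isPrefixOf (c :: t) then pvRep ++ pvScan ((c :: t).drop pvT2.length)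
      else if pvT3.isPrefixOf (c :: t) then pvRep ++ pvScan ((c :: t).drop pvT3.length)
      else if pvT4.isPrefixOf (c :: t) then pvRep ++ pvScan ((c :: t).drop pvT4.length)
      else c :: pvScan t
termination_by s => s.length
decreasing_by
  all_goals simp [pvT1_len, pvT2_len, pvT3_len, pvT4_len]

def sanitize_partner_communications_alt (message : String) : String :=
  String.ofList (pvScan message.toList)

-- ===== PRECONDITION & SPEC =====
def Spec_sanitize_partner_communications (message : String) (out : String) : Prop := out = sanitize_partner_communications_alt message
instance (message : String) (out : String) : Decidable (Spec_sanitize_partner_communications message out) := by unfold Spec_sanitize_partner_communications; infer_instance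

-- ===== CLAIM (what is proved, stated in full; the proofs are below) =====
def Claim_equal_sanitize_partner_communications : Prop := ∀ (message : String), Dom_sanitize_partner_communications message → Spec_sanitize_partner_communications message (sanitize_partner_communications message)

-- ===== LEMMAS AND PROOFS =====

-- clean recursion equivalent to PySem.Chars.replace (for nonempty pattern)
def pvRepl (old new : List Char) : List Char → List Char
  | [] => []
  | c :: t =>
      if _h : old.isPrefixOf (c :: t) = true ∧ old ≠ [] then new ++ pvRepl old new ((c :: t).drop old.length)
      else c :: pvRepl old new t
termination_by s => s.length
decreasing_by
  · have : 0 < old.length := List.length_pos_iff.mpr _h.2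
    simp; omega
  · simp

theorem pvRepl_go (old new : List Char) (hold : old ≠ []) :
    ∀ (fuel : Nat) (l acc : List Char), l.length ≤ fuel →
      PySem.Chars.replace.go old new fuel l acc = acc.reverse ++ pvRepl old new l := by
  intro fuel
  induction fuel with
  | zero =>
      intro l acc hl
      have : l = [] := List.eq_nil_of_length_eq_zero (Nat.le_zero.mp hl)
      subst this
      simp [PySem.Chars.replace.go, pvRepl]
  | succ n ih =>
      intro l acc hl
      cases l with
      | nil => simp [PySem.Chars.replace.go, pvRepl]
      | cons c t =>
          by_cases h : old.isPrefixOf (c :: t) = true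
          · rw [PySem.Chars.replace.go]
            simp only [h, if_pos]
            have hlen : ((c :: t).drop old.length).length ≤ n := by
              have : 0 < old.length := List.length_pos_iff.mpr hold
              simp at hl ⊢
              omega
            rw [ih _ _ hlen]
            rw [pvRepl]
            simp [h, hold]
          · rw [PySem.Chars.replace.go]
            simp only [h, if_neg, Bool.false_eq_true, not_false_iff]
            have hlen : t.length ≤ n := by simp at hl; omega
            rw [ih _ _ hlen]
            rw [pvRepl]
            simp [h]

theorem pvReplace_eq (old new s : List Char) (hold : old ≠ []) :
    PySem.Chars.replace s old new = pvRepl old new s := by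
  rw [PySem.Chars.replace]
  have : old.isEmpty = false := by simpa using hold
  rw [this]
  simpa using pvRepl_go old new hold s.length s [] (le_refl _)

theorem pvRepl_nil (old new : List Char) : pvRepl old new [] = [] := by rw [pvRepl]

theorem pvRepl_nomatch (old new : List Char) (c : Char) (t : List Char)
    (h : ¬ old <+: (c :: t)) : pvRepl old new (c :: t) = c :: pvRepl old new t := by
  rw [pvRepl]
  have hc : ¬ (old.isPrefixOf (c :: t) = true ∧ old ≠ []) := by
    rintro ⟨h1, -⟩; exact h (List.isPrefixOf_iff_prefix.mp h1)
  rw [dif_neg hc]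

theorem pvRepl_match (old new : List Char) (s : List Char)
    (hold : old ≠ []) (h : old <+: s) :
    pvRepl old new s = new ++ pvRepl old new (s.drop old.length) := by
  cases s with
  | nil =>
      exact absurd (List.prefix_nil.mp h) hold
  | cons c t =>
      rw [pvRepl]
      have hc : old.isPrefixOf (c :: t) = true ∧ old ≠ [] := ⟨List.isPrefixOf_iff_prefix.mpr h, hold⟩
      rw [dif_pos hc]

-- incomparability of u with every suffix-start of p: u can match nowhere in the first |p| positions of p ++ x
def pvIncomp (p u : List Char) : Prop :=
  ∀ k, k < p.length → ¬ (p.drop k <+: u) ∧ ¬ (u <+: p.drop k)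

theorem pvPrefix_append_cases {u p x : List Char} (h : u <+: p ++ x) : u <+: p ∨ p <+: u := by
  have hp : p <+: p ++ x := List.prefix_append p x
  exact (List.prefix_or_prefix_of_prefix h hp).imp id id

theorem pvRepl_skip (u new : List Char) :
    ∀ (p x : List Char), pvIncomp p u → pvRepl u new (p ++ x) = p ++ pvRepl u new x := by
  intro p
  induction p with
  | nil => intro x _; simp
  | cons c p' ih =>
      intro x hinc
      have h0 := hinc 0 (by simp)
      have hnp : ¬ u <+: (c :: p') ++ x := by
        intro hu
        rcases pvPrefix_append_cases hu with h | h
        · exact h0.2 (by simpa using h)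
        · exact h0.1 (by simpa using h)
      rw [List.cons_append, pvRepl_nomatch u new c (p' ++ x) (by simpa using hnp)]
      rw [ih x (fun k hk => by simpa using hinc (k + 1) (by simpa using hk))]
      simp

theorem pvRepl_reflect (old : List Char) :
    ∀ (s u : List Char), '[' ∉ u → u <+: pvRepl old pvRep s → u <+: s := by
  intro s
  induction s with
  | nil =>
      intro u hu h
      rw [pvRepl_nil] at h
      exact h.trans List.nil_prefix
  | cons c t ih =>
      intro u hu h
      by_cases hm : old.isPrefixOf (c :: t) = true ∧ old ≠ []
      · rw [pvRepl, dif_pos hm] at h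
        rcases pvPrefix_append_cases h with h' | h'
        · cases u with
          | nil => exact List.nil_prefix
          | cons a u' =>
              exfalso
              have hrep : pvRep = '[' :: "CONFIDENTIAL]".toList := by decide
              rw [hrep] at h'
              rcases List.cons_prefix_cons.mp h' with ⟨rfl, -⟩
              exact hu (by simp)
        · exact absurd (h'.subset (by decide)) hu
      · rw [pvRepl, dif_neg hm] at h
        cases u with
        | nil => exact List.nil_prefix
        | cons a u' =>
            rcases List.cons_prefix_cons.mp h with ⟨rfl, h'⟩
            exact List.cons_prefix_cons.mpr ⟨rfl, ih u' (fun hx => hu (by simp [hx])) h'⟩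

-- decidable facts about the concrete terms
theorem pvInc21 : pvIncomp pvT2 pvT1 := by unfold pvIncomp; decide
theorem pvInc31 : pvIncomp pvT3 pvT1 := by unfold pvIncomp; decide
theorem pvInc32 : pvIncomp pvT3 pvT2 := by unfold pvIncomp; decide
theorem pvInc41 : pvIncomp pvT4 pvT1 := by unfold pvIncomp; decide
theorem pvInc42 : pvIncomp pvT4 pvT2 := by unfold pvIncomp; decide
theorem pvInc43 : pvIncomp pvT4 pvT3 := by unfold pvIncomp; decide
theorem pvIncR2 : pvIncomp pvRep pvT2 := by unfold pvIncomp; decide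
theorem pvIncR3 : pvIncomp pvRep pvT3 := by unfold pvIncomp; decide
theorem pvIncR4 : pvIncomp pvRep pvT4 := by unfold pvIncomp; decide
theorem pvNB2 : '[' ∉ pvT2 := by decide
theorem pvNB3 : '[' ∉ pvT3 := by decide
theorem pvNB4 : '[' ∉ pvT4 := by decide
theorem pvNE1 : pvT1 ≠ [] := by decide
theorem pvNE2 : pvT2 ≠ [] := by decide
theorem pvNE3 : pvT3 ≠ [] := by decide
theorem pvNE4 : pvT4 ≠ [] := by decide

def pvSeq (s : List Char) : List Char :=
  pvRepl pvT4 pvRep (pvRepl pvT3 pvRep (pvRepl pvT2 pvRep (pvRepl pvT1 pvRep s)))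

theorem pvMain : ∀ s : List Char, pvSeq s = pvScan s := by
  intro s
  induction s using pvScan.induct with
  | case1 => simp [pvSeq, pvRepl_nil, pvScan]
  | case2 c t h1 ih =>
      have h1' : pvT1 <+: (c :: t) := List.isPrefixOf_iff_prefix.mp h1
      obtain ⟨r, hr⟩ := List.isPrefixOf_iff_prefix.mp h1
      have hdrop : (c :: t).drop pvT1.length = r := by rw [← hr, List.drop_left]
      rw [pvScan]
      simp only [h1, if_pos]
      rw [hdrop] at ih ⊢
      rw [← ih]
      unfold pvSeq
      rw [pvRepl_match pvT1 pvRep _ pvNE1 h1', hdrop,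
        pvRepl_skip pvT2 pvRep pvRep _ pvIncR2,
        pvRepl_skip pvT3 pvRep pvRep _ pvIncR3,
        pvRepl_skip pvT4 pvRep pvRep _ pvIncR4]
  | case3 c t h1 h2 ih =>
      have h2' : pvT2 <+: (c :: t) := List.isPrefixOf_iff_prefix.mp h2
      obtain ⟨r, hr⟩ := h2'
      have hdrop : (c :: t).drop pvT2.length = r := by rw [← hr, List.drop_left]
      rw [pvScan]
      simp only [h1, h2, if_pos, if_neg, Bool.false_eq_true, not_false_iff]
      rw [hdrop] at ih ⊢
      rw [← ih]
      unfold pvSeq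
      rw [← hr,
        pvRepl_skip pvT1 pvRep pvT2 _ pvInc21,
        pvRepl_match pvT2 pvRep _ pvNE2 (List.prefix_append _ _), List.drop_left,
        pvRepl_skip pvT3 pvRep pvRep _ pvIncR3,
        pvRepl_skip pvT4 pvRep pvRep _ pvIncR4]
  | case4 c t h1 h2 h3 ih =>
      have h3' : pvT3 <+: (c :: t) := List.isPrefixOf_iff_prefix.mp h3
      obtain ⟨r, hr⟩ := h3'
      have hdrop : (c :: t).drop pvT3.length = r := by rw [← hr, List.drop_left]
      rw [pvScan]
      simp only [h1, h2, h3, if_pos, if_neg, Bool.false_eq_true, not_false_iff]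
      rw [hdrop] at ih ⊢
      rw [← ih]
      unfold pvSeq
      rw [← hr,
        pvRepl_skip pvT1 pvRep pvT3 _ pvInc31,
        pvRepl_skip pvT2 pvRep pvT3 _ pvInc32,
        pvRepl_match pvT3 pvRep _ pvNE3 (List.prefix_append _ _), List.drop_left,
        pvRepl_skip pvT4 pvRep pvRep _ pvIncR4]
  | case5 c t h1 h2 h3 h4 ih =>
      have h4' : pvT4 <+: (c :: t) := List.isPrefixOf_iff_prefix.mp h4
      obtain ⟨r, hr⟩ := h4'
      have hdrop : (c :: t).drop pvT4.length = r := by rw [← hr, List.drop_left]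
      rw [pvScan]
      simp only [h1, h2, h3, h4, if_pos, if_neg, Bool.false_eq_true, not_false_iff]
      rw [hdrop] at ih ⊢
      rw [← ih]
      unfold pvSeq
      rw [← hr,
        pvRepl_skip pvT1 pvRep pvT4 _ pvInc41,
        pvRepl_skip pvT2 pvRep pvT4 _ pvInc42,
        pvRepl_skip pvT3 pvRep pvT4 _ pvInc43,
        pvRepl_match pvT4 pvRep _ pvNE4 (List.prefix_append _ _), List.drop_left]
  | case6 c t h1 h2 h3 h4 ih =>
      have hn1 : ¬ pvT1 <+: (c :: t) := fun h => by simp [List.isPrefixOf_iff_prefix.mpr h] at h1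
      have hn2 : ¬ pvT2 <+: (c :: t) := fun h => by simp [List.isPrefixOf_iff_prefix.mpr h] at h2
      have hn3 : ¬ pvT3 <+: (c :: t) := fun h => by simp [List.isPrefixOf_iff_prefix.mpr h] at h3
      have hn4 : ¬ pvT4 <+: (c :: t) := fun h => by simp [List.isPrefixOf_iff_prefix.mpr h] at h4
      rw [pvScan]
      simp only [h1, h2, h3, h4, if_neg, Bool.false_eq_true, not_false_iff]
      unfold pvSeq
      have e1 : pvRepl pvT1 pvRep (c :: t) = c :: pvRepl pvT1 pvRep t :=
        pvRepl_nomatch _ _ _ _ hn1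
      have hn2' : ¬ pvT2 <+: (c :: pvRepl pvT1 pvRep t) := by
        intro h
        exact hn2 (pvRepl_reflect pvT1 (c :: t) pvT2 pvNB2 (by rw [e1]; exact h))
      have e2 : pvRepl pvT2 pvRep (pvRepl pvT1 pvRep (c :: t))
          = c :: pvRepl pvT2 pvRep (pvRepl pvT1 pvRep t) := by
        rw [e1]; exact pvRepl_nomatch _ _ _ _ hn2'
      have hn3' : ¬ pvT3 <+: (c :: pvRepl pvT2 pvRep (pvRepl pvT1 pvRep t)) := by
        intro h
        have h' : pvT3 <+: pvRepl pvT2 pvRep (pvRepl pvT1 pvRep (c :: t)) := by rw [e2]; exact h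
        exact hn3 (pvRepl_reflect pvT1 (c :: t) pvT3 pvNB3
          (pvRepl_reflect pvT2 _ pvT3 pvNB3 h'))
      have e3 : pvRepl pvT3 pvRep (pvRepl pvT2 pvRep (pvRepl pvT1 pvRep (c :: t)))
          = c :: pvRepl pvT3 pvRep (pvRepl pvT2 pvRep (pvRepl pvT1 pvRep t)) := by
        rw [e2]; exact pvRepl_nomatch _ _ _ _ hn3'
      have hn4' : ¬ pvT4 <+: (c :: pvRepl pvT3 pvRep (pvRepl pvT2 pvRep (pvRepl pvT1 pvRep t))) := by
        intro h
        have h' : pvT4 <+: pvRepl pvT3 pvRep (pvRepl pvT2 pvRep (pvRepl pvT1 pvRep (c :: t))) := by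
          rw [e3]; exact h
        exact hn4 (pvRepl_reflect pvT1 (c :: t) pvT4 pvNB4
          (pvRepl_reflect pvT2 _ pvT4 pvNB4 (pvRepl_reflect pvT3 _ pvT4 pvNB4 h')))
      rw [e3, pvRepl_nomatch _ _ _ _ hn4', ← ih]
      rfl

theorem pvA_toList (m : String) :
    (sanitize_partner_communications m).toList = pvSeq m.toList := by
  unfold sanitize_partner_communications pvSeq
  simp only [List.foldl_cons, List.foldl_nil, PySem.Str.toList_replace]
  rw [pvReplace_eq _ _ _ (by decide), pvReplace_eq _ _ _ (by decide),
    pvReplace_eq _ _ _ (by decide), pvReplace_eq _ _ _ (by decide)]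
  rfl

-- ===== VERDICT (by name: the statement is the Claim_ definition above) =====
theorem sanitize_partner_communications_spec : Claim_equal_sanitize_partner_communications := by
  intro message _
  unfold Spec_sanitize_partner_communications sanitize_partner_communications_alt
  have h : (sanitize_partner_communications message).toList = pvScan message.toList := by
    rw [pvA_toList, pvMain]
  apply String.toList_inj.mp
  rw [h, String.toList_ofList]
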